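-- pv_equiv track=rewrite | github.com/pianowow/projecteuler | 115/115.py | count
-- ===== SOURCE A (Python) =====
-- def count(m, gap, cache):
--   if (gap < m):
--      return 0
--   if (cache[gap] != -1):
--      return cache[gap]
--
--   total = 0
--   for len in range(m,gap+1):
--     maxpos = gap - len + 1
--     total += maxpos
--     for pos in range(0,maxpos+1):
--       total += count(m, gap - len - pos - 1, cache)
--   cache[gap] = total
--   return total
-- ===== SOURCE B (Python) =====
-- def count(m, gap, cache):
--     if gap < m:
--         return 0
--     if cache[gap] != -1:
--         return cache[gap]
--     # bottom-up DP: pref[k] = f(0)+...+f(k-1), where f(g) is the arrangement count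
--     pref = [0]
--     v = 0
--     for g in range(gap + 1):
--         if g < m:
--             v = 0
--         elif cache[g] != -1:
--             v = cache[g]
--         else:
--             v = 0
--             for k in range(g - m + 1):
--                 v += (k + 1) + pref[k]
--         pref.append(pref[-1] + v)
--     return v
-- ===== Notes on version B (the rewrite author's own statement) =====
-- stated objective: alternative
-- what changed: Replaced A's memoized top-down recursion (a double loop over cached recursive calls per entry) by a single bottom-up pass that keeps a running prefix-sum list of the already-computed counts, so the recursion and the inner pos-loop disappear.
-- outside the precondition, e.g. on count(-3, -3, [-1, 7, 7]): A returns 15, B returns 0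
import Mathlib
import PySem

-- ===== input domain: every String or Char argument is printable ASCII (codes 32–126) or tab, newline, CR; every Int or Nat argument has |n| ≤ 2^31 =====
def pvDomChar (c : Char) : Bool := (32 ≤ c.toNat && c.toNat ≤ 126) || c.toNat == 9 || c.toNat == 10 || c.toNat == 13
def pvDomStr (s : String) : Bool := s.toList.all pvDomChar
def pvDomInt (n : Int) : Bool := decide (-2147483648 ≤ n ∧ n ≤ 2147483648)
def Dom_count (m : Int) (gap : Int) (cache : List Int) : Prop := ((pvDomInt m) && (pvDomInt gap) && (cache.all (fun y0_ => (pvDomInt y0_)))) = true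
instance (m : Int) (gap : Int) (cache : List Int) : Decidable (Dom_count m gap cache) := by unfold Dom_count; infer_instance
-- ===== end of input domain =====

-- B replaces A's memoized top-down recursion by one bottom-up pass with a prefix-sum list
-- (an alternative algorithm of similar cost on typical inputs). A memoizes by writing into
-- the `cache` argument in place; the equivalence proved here is about the RETURN value only
-- (B only reads `cache`).

-- ===== PORT A =====
-- fuel-based transliteration of A's recursion; fuel gap.toNat+1 suffices on Pre_ (each
-- recursive call strictly decreases gap when 0 ≤ m).
def pvCountGo : Nat → Int → Int → List Int → Int × List Int
  | 0, _, _, cache => (0, cache)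
  | fuel+1, m, gap, cache =>
    if gap < m then (0, cache)
    else
      match PySem.List.pyGet? cache gap with
      | none => (0, cache)                      -- IndexError; excluded by Pre_
      | some c =>
        if c ≠ -1 then (c, cache)
        else
          let r := (PySem.List.pyRange m (gap+1) 1).foldl
            (fun (st : Int × List Int) len =>
              let maxpos := gap - len + 1
              (PySem.List.pyRange 0 (maxpos+1) 1).foldl
                (fun (st2 : Int × List Int) pos =>
                  let res := pvCountGo fuel m (gap - len - pos - 1) st2.2
                  (st2.1 + res.1, res.2))
                (st.1 + maxpos, st.2))
            (0, cache)
          (r.1, PySem.List.pySetD r.2 gap r.1)  -- cache[gap] = total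

def count (m : Int) (gap : Int) (cache : List Int) : Int :=
  (pvCountGo (gap.toNat + 1) m gap cache).1

-- ===== PORT B =====
-- one iteration of B's bottom-up loop: state = (pref, v); pref[k] = f(0)+...+f(k-1)
def pvAltBody (m : Int) (cache : List Int) (st : List Int × Int) (g : Int) : List Int × Int :=
  let v : Int :=
    if g < m then 0
    else
      match PySem.List.pyGet? cache g with
      | none => 0                               -- IndexError; excluded by Pre_
      | some cg =>
        if cg ≠ -1 then cg
        else (PySem.List.pyRange 0 (g - m + 1) 1).foldl
              (fun acc k => acc + (k + 1) + PySem.List.pyGetD st.1 k 0) 0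
  (st.1 ++ [PySem.List.pyGetD st.1 (-1) 0 + v], v)

def count_alt (m : Int) (gap : Int) (cache : List Int) : Int :=
  if gap < m then 0
  else
    match PySem.List.pyGet? cache gap with
    | none => 0                                 -- IndexError; excluded by Pre_
    | some c =>
      if c ≠ -1 then c
      else ((PySem.List.pyRange 0 (gap+1) 1).foldl (pvAltBody m cache) ([0], 0)).2

-- ===== PRECONDITION & SPEC =====
-- Pre_ excludes inputs on which A raises (IndexError for gap ≥ len(cache), unbounded
-- recursion / RecursionError for most m < 0 inputs), and the residual m < 0, cache[gap] == -1
-- corner where A's recursion mixes negative-index wraparound with leftover cache entries.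
def Pre_count (m : Int) (gap : Int) (cache : List Int) : Prop :=
  gap < m ∨ (0 ≤ m ∧ gap < (cache.length : Int)) ∨
    (m < 0 ∧ m ≤ gap ∧ PySem.Raise.InRange cache.length gap ∧
      PySem.List.pyGet? cache gap ≠ some (-1))
instance (m : Int) (gap : Int) (cache : List Int) : Decidable (Pre_count m gap cache) := by
  unfold Pre_count; infer_instance
def pvWitness_count : Int × Int × List Int := (2, 4, [-1, -1, -1, -1, -1])
def Spec_count (m : Int) (gap : Int) (cache : List Int) (out : Int) : Prop := out = count_alt m gap cache
instance (m : Int) (gap : Int) (cache : List Int) (out : Int) : Decidable (Spec_count m gap cache out) := by unfold Spec_count; infer_instance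

-- ===== CLAIM (what is proved, stated in full; the proofs are below) =====
def Claim_equal_count : Prop := ∀ (m : Int) (gap : Int) (cache : List Int), Dom_count m gap cache → Pre_count m gap cache → Spec_count m gap cache (count m gap cache)

-- ===== LEMMAS AND PROOFS =====

-- The canonical value f(g) both programs compute, defined bottom-up like B but with
-- mathematical prefix sums instead of the maintained list.
def fstep (m : Int) (cache : List Int) (g : Int) (vs : List Int) : Int :=
  if g < m then 0
  else
    match PySem.List.pyGet? cache g with
    | none => 0
    | some c =>
      if c ≠ -1 then c
      else (PySem.List.pyRange 0 (g - m + 1) 1).foldl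
            (fun acc k => acc + (k + 1) + ((vs.take k.toNat).sum)) 0

def fvals (m : Int) (cache : List Int) : Nat → List Int
  | 0 => []
  | n+1 => fvals m cache n ++ [fstep m cache (n : Int) (fvals m cache n)]

def fvalI (m : Int) (cache : List Int) (g : Int) : Int :=
  if g < 0 then 0 else (fvals m cache (g.toNat + 1)).getD g.toNat 0

def Psum (m : Int) (cache : List Int) (k : Nat) : Int := (fvals m cache k).sum

theorem fvals_length (m : Int) (cache : List Int) (n : Nat) : (fvals m cache n).length = n := by
  induction n with
  | zero => rfl
  | succ n ih => simp [fvals, ih]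

theorem fvals_take (m : Int) (cache : List Int) {k n : Nat} (h : k ≤ n) :
    (fvals m cache n).take k = fvals m cache k := by
  induction n with
  | zero => simp_all [fvals]
  | succ n ih =>
    rcases Nat.lt_or_ge k (n+1) with h' | h'
    · have hk : k ≤ n := Nat.lt_succ_iff.mp h'
      rw [fvals, List.take_append_of_le_length (by simp [fvals_length, hk]), ih hk]
    · have hk : k = n + 1 := le_antisymm h h'
      subst hk
      exact List.take_of_length_le (by simp [fvals_length])

theorem fvalI_eq_fstep (m : Int) (cache : List Int) {g : Int} (h : 0 ≤ g) :
    fvalI m cache g = fstep m cache g (fvals m cache g.toNat) := by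
  have hg : (g.toNat : Int) = g := Int.toNat_of_nonneg h
  rw [fvalI, if_neg (by omega)]
  conv_lhs => rw [fvals]
  have hlen : (fvals m cache g.toNat).length = g.toNat := fvals_length m cache g.toNat
  rw [List.getD_append_right _ _ _ _ (by omega)]
  simp [hlen, hg]

theorem fvalI_of_lt (m : Int) (cache : List Int) {g : Int} (h : g < m) :
    fvalI m cache g = 0 := by
  by_cases hg : g < 0
  · simp [fvalI, hg]
  · rw [fvalI_eq_fstep m cache (by omega), fstep, if_pos h]

theorem fvalI_of_neg (m : Int) (cache : List Int) {g : Int} (h : g < 0) :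
    fvalI m cache g = 0 := by simp [fvalI, h]

theorem fvals_eq_map (m : Int) (cache : List Int) (n : Nat) :
    fvals m cache n = (List.range n).map (fun t : Nat => fvalI m cache (t : Int)) := by
  induction n with
  | zero => rfl
  | succ n ih =>
    rw [fvals, List.range_succ, List.map_append, ih]
    simp [fvalI_eq_fstep m cache (g := (n : Int)) (by positivity), Int.toNat_natCast, ih]

theorem Psum_succ (m : Int) (cache : List Int) (k : Nat) :
    Psum m cache (k+1) = Psum m cache k + fvalI m cache (k : Int) := by
  rw [Psum, Psum, fvals]
  simp [fvalI_eq_fstep m cache (g := (k : Int)) (by positivity), Int.toNat_natCast]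

theorem Psum_eq (m : Int) (cache : List Int) (k : Nat) :
    Psum m cache k = ((List.range k).map (fun t : Nat => fvalI m cache (t : Int))).sum := by
  rw [Psum, fvals_eq_map]

-- ---- B-side: the bottom-up loop computes fvalI ----

theorem step_eq (m : Int) (cache : List Int) (hm : 0 ≤ m) (j : Nat) (pref : List Int)
    (hlen : pref.length = j + 1)
    (hpref : ∀ k : Nat, k ≤ j → pref.getD k 0 = Psum m cache k) :
    (if (j : Int) < m then 0
     else match PySem.List.pyGet? cache (j : Int) with
       | none => 0
       | some cg => if cg ≠ -1 then cg
         else (PySem.List.pyRange 0 ((j : Int) - m + 1) 1).foldl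
               (fun acc k => acc + (k + 1) + PySem.List.pyGetD pref k 0) 0)
    = fvalI m cache (j : Int) := by
  rw [fvalI_eq_fstep m cache (by positivity), Int.toNat_natCast, fstep]
  by_cases h1 : (j : Int) < m
  · simp [h1]
  · simp only [if_neg h1]
    cases hg : PySem.List.pyGet? cache (j : Int) with
    | none => rfl
    | some cg =>
      by_cases h2 : cg ≠ -1
      · simp [h2]
      · simp only [if_neg h2]
        apply PySem.List.foldl_congr_mem
        intro acc k hk
        obtain ⟨hk0, hk1⟩ := PySem.List.mem_pyRange_one.mp hk
        have hkj : k.toNat ≤ j := by omega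
        have hkc : k = ((k.toNat : Nat) : Int) := by omega
        rw [hkc, PySem.List.pyGetD_natCast, hpref k.toNat hkj]
        simp only [Int.toNat_natCast]
        rw [fvals_take m cache hkj, Psum]

theorem alt_loop (m : Int) (cache : List Int) (hm : 0 ≤ m) (j : Nat) :
    (PySem.List.pyRange 0 (j : Int) 1).foldl (pvAltBody m cache) ([0], 0)
      = ((List.range (j+1)).map (fun k => Psum m cache k),
         if j = 0 then 0 else fvalI m cache ((j : Int) - 1)) := by
  induction j with
  | zero =>
    rw [show ((0 : Nat) : Int) = 0 from rfl, PySem.List.pyRange_one_eq_nil le_rfl]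
    simp [Psum, fvals]
  | succ j ihj =>
    have hc1 : ((j + 1 : Nat) : Int) = (j : Int) + 1 := by push_cast; ring
    rw [hc1, PySem.List.pyRange_one_succ_right (by positivity), List.foldl_append, ihj]
    simp only [List.foldl_cons, List.foldl_nil, pvAltBody]
    have hpref : ∀ k : Nat, k ≤ j →
        ((List.range (j+1)).map (fun k => Psum m cache k)).getD k 0 = Psum m cache k := by
      intro k hk
      simp [List.getD_eq_getElem?_getD, List.getElem?_map, List.getElem?_range,
        Nat.lt_succ_of_le hk]
    have hv := step_eq m cache hm j ((List.range (j+1)).map (fun k => Psum m cache k))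
      (by simp) hpref
    rw [hv]
    have hlast : PySem.List.pyGetD ((List.range (j+1)).map (fun k => Psum m cache k)) (-1) 0
        = Psum m cache j := by
      rw [List.range_succ, List.map_append]
      exact PySem.List.pyGetD_neg_one_append_singleton _ _ _
    rw [hlast]
    have hsnd : ((j + 1 : Nat) : Int) - 1 = (j : Int) := by push_cast; ring
    refine Prod.ext ?_ ?_
    · show (List.range (j+1)).map (fun k => Psum m cache k) ++ [Psum m cache j + fvalI m cache (j : Int)]
        = (List.range (j+1+1)).map (fun k => Psum m cache k)
      rw [List.range_succ (n := j+1), List.map_append, ← Psum_succ]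
      simp
    · show fvalI m cache (j : Int) = if j + 1 = 0 then 0 else fvalI m cache (((j+1 : Nat) : Int) - 1)
      rw [if_neg (Nat.succ_ne_zero j), hsnd]

theorem count_alt_eq (m gap : Int) (cache : List Int) (hm0 : 0 ≤ m)
    (hlenc : gap < (cache.length : Int)) :
    count_alt m gap cache = fvalI m cache gap := by
  by_cases hgm : gap < m
  · rw [count_alt, if_pos hgm, fvalI_of_lt m cache hgm]
  · have hgap0 : 0 ≤ gap := le_trans hm0 (not_lt.mp hgm)
    have hget : PySem.List.pyGet? cache gap = some (cache.getD gap.toNat 0) := by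
      rw [PySem.List.pyGet?_eq_some_getElem cache hgap0 (by omega)]
      congr 1
      exact (List.getD_eq_getElem cache 0 (by omega)).symm
    rw [count_alt, if_neg hgm, hget]
    by_cases hne : cache.getD gap.toNat 0 ≠ -1
    · simp only [if_pos hne]
      rw [fvalI_eq_fstep m cache hgap0, fstep, if_neg hgm, hget]
      simp only [ne_eq, ite_not] at hne ⊢
      rw [if_neg hne]
    · simp only [if_neg hne]
      have hj : gap + 1 = ((gap.toNat + 1 : Nat) : Int) := by omega
      rw [hj, alt_loop m cache hm0 (gap.toNat + 1)]
      have hsnd : ((gap.toNat + 1 : Nat) : Int) - 1 = gap := by omega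
      rw [if_neg (Nat.succ_ne_zero gap.toNat), hsnd]

-- ---- A-side: memoization correctness ----

def Consistent (m : Int) (cache c : List Int) : Prop :=
  c.length = cache.length ∧ ∀ i : Nat, i < cache.length →
    c.getD i 0 = cache.getD i 0 ∨ (cache.getD i 0 = -1 ∧ c.getD i 0 = fvalI m cache (i : Int))

theorem inner_sum_eq (m : Int) (cache : List Int) (K : Nat) :
    ((PySem.List.pyRange 0 ((K : Int) + 2) 1).map
        (fun pos => fvalI m cache ((K : Int) - pos - 1))).sum = Psum m cache K := by
  have h0 : ((K : Int) + 2) = ((K + 2 : Nat) : Int) := by push_cast; ring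
  rw [h0, PySem.List.pyRange_zero_natCast, List.map_map]
  have h1 : ∀ j ∈ List.range (K + 2),
      ((fun pos => fvalI m cache ((K : Int) - pos - 1)) ∘ fun k : Nat => (k : Int)) j
        = (fun j : Nat => fvalI m cache ((K : Int) - (j : Int) - 1)) j := by
    intro j _; rfl
  rw [List.map_congr_left h1]
  rw [show K + 2 = (K + 1) + 1 from rfl, List.range_succ, List.range_succ]
  rw [List.map_append, List.map_append, List.sum_append, List.sum_append]
  have hz1 : fvalI m cache ((K : Int) - ((K : Nat) : Int) - 1) = 0 :=
    fvalI_of_neg m cache (by omega)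
  have hz2 : fvalI m cache ((K : Int) - (((K + 1 : Nat)) : Int) - 1) = 0 :=
    fvalI_of_neg m cache (by push_cast; omega)
  simp only [List.map_cons, List.map_nil, List.sum_cons, List.sum_nil, hz1, hz2,
    add_zero]
  have h2 : ∀ j ∈ List.range K,
      (fun j : Nat => fvalI m cache ((K : Int) - (j : Int) - 1)) j
        = (fun t : Nat => fvalI m cache (t : Int)) (K - 1 - j) := by
    intro j hj
    have hj' : j < K := List.mem_range.mp hj
    have : ((K - 1 - j : Nat) : Int) = (K : Int) - (j : Int) - 1 := by omega
    simp only [this]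
  rw [List.map_congr_left h2]
  have bridge : ∀ (f : Nat → Int) (n : Nat),
      ((List.range n).map f).sum = ∑ i ∈ Finset.range n, f i := by
    intro f n; exact Int.neg_inj.mp rfl
  rw [bridge,
    Finset.sum_range_reflect (fun t : Nat => fvalI m cache (t : Int)) K,
    Psum_eq, bridge]

theorem outer_sum_eq (m : Int) (cache : List Int) (gap : Int) (hmg : m ≤ gap) :
    ((PySem.List.pyRange m (gap+1) 1).map
        (fun len => (gap - len + 1) + Psum m cache (gap - len).toNat)).sum
      = ((PySem.List.pyRange 0 (gap - m + 1) 1).map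
        (fun k => (k + 1) + Psum m cache k.toNat)).sum := by
  have bridge : ∀ (f : Nat → Int) (n : Nat),
      ((List.range n).map f).sum = ∑ i ∈ Finset.range n, f i := by
    intro f n; exact Int.neg_inj.mp rfl
  set G : Nat := (gap - m).toNat with hG
  have hGI : ((G : Nat) : Int) = gap - m := by omega
  have hN1 : (gap + 1 - m).toNat = G + 1 := by omega
  have hN2 : (gap - m + 1 - 0).toNat = G + 1 := by omega
  rw [PySem.List.pyRange_one m (gap + 1), PySem.List.pyRange_one 0 (gap - m + 1), hN1, hN2,
    List.map_map, List.map_map]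
  have h1 : ∀ j ∈ List.range (G + 1),
      ((fun len => (gap - len + 1) + Psum m cache (gap - len).toNat) ∘ fun k : Nat => m + (k : Int)) j
        = (fun t : Nat => ((t : Int) + 1) + Psum m cache t) ((G + 1) - 1 - j) := by
    intro j hj
    have hj' : j < G + 1 := List.mem_range.mp hj
    have e1 : gap - (m + (j : Int)) + 1 = ((G - j : Nat) : Int) + 1 := by omega
    have e2 : (gap - (m + (j : Int))).toNat = G - j := by omega
    simp only [Function.comp_apply, e1, e2]
    norm_num
  have h2 : ∀ j ∈ List.range (G + 1),
      ((fun k => (k + 1) + Psum m cache k.toNat) ∘ fun k : Nat => 0 + (k : Int)) j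
        = (fun t : Nat => ((t : Int) + 1) + Psum m cache t) j := by
    intro j hj
    simp only [Function.comp_apply, zero_add, Int.toNat_natCast]
  rw [List.map_congr_left h1, List.map_congr_left h2, bridge, bridge,
    Finset.sum_range_reflect (fun t : Nat => ((t : Int) + 1) + Psum m cache t) (G + 1)]

theorem inner_loop (fuel : Nat) (m : Int) (cache : List Int) (hm : 0 ≤ m)
    (IH : ∀ gap c, Consistent m cache c → (gap < m ∨ gap < (cache.length : Int)) →
        (gap < m ∨ gap.toNat + 1 ≤ fuel) →
        (pvCountGo fuel m gap c).1 = fvalI m cache gap ∧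
          Consistent m cache (pvCountGo fuel m gap c).2)
    (gap len : Int) (hgap0 : 0 ≤ gap) (hgapl : gap < (cache.length : Int))
    (hfuel : gap.toNat ≤ fuel) (hlen : m ≤ len) :
    ∀ (poss : List Int), (∀ p ∈ poss, 0 ≤ p) →
    ∀ (t : Int) (c : List Int), Consistent m cache c →
      (poss.foldl (fun (st2 : Int × List Int) pos =>
          let res := pvCountGo fuel m (gap - len - pos - 1) st2.2
          (st2.1 + res.1, res.2)) (t, c)).1
        = t + (poss.map (fun pos => fvalI m cache (gap - len - pos - 1))).sum ∧
      Consistent m cache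
        ((poss.foldl (fun (st2 : Int × List Int) pos =>
          let res := pvCountGo fuel m (gap - len - pos - 1) st2.2
          (st2.1 + res.1, res.2)) (t, c)).2) := by
  intro poss
  induction poss with
  | nil => intro _ t c hc; exact ⟨by simp, hc⟩
  | cons p ps ih =>
    intro hpos t c hc
    have hp : 0 ≤ p := hpos p (by simp)
    have hps : ∀ q ∈ ps, 0 ≤ q := fun q hq => hpos q (by simp [hq])
    have hpre : gap - len - p - 1 < m ∨ gap - len - p - 1 < (cache.length : Int) :=
      Or.inr (by omega)
    have hfu : gap - len - p - 1 < m ∨ (gap - len - p - 1).toNat + 1 ≤ fuel := by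
      by_cases h : gap - len - p - 1 < m
      · exact Or.inl h
      · right
        have h0 : 0 ≤ gap - len - p - 1 := le_trans hm (not_lt.mp h)
        omega
    obtain ⟨h1, h2⟩ := IH (gap - len - p - 1) c hc hpre hfu
    simp only [List.foldl_cons]
    obtain ⟨h3, h4⟩ := ih hps (t + (pvCountGo fuel m (gap - len - p - 1) c).1)
      (pvCountGo fuel m (gap - len - p - 1) c).2 h2
    refine ⟨?_, h4⟩
    rw [h3, h1]
    simp only [List.map_cons, List.sum_cons]
    ring

theorem outer_loop (fuel : Nat) (m : Int) (cache : List Int) (hm : 0 ≤ m)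
    (IH : ∀ gap c, Consistent m cache c → (gap < m ∨ gap < (cache.length : Int)) →
        (gap < m ∨ gap.toNat + 1 ≤ fuel) →
        (pvCountGo fuel m gap c).1 = fvalI m cache gap ∧
          Consistent m cache (pvCountGo fuel m gap c).2)
    (gap : Int) (hgap0 : 0 ≤ gap) (hgapl : gap < (cache.length : Int))
    (hfuel : gap.toNat ≤ fuel) :
    ∀ (lens : List Int), (∀ l ∈ lens, m ≤ l) →
    ∀ (t : Int) (c : List Int), Consistent m cache c →
      (lens.foldl (fun (st : Int × List Int) len =>
          let maxpos := gap - len + 1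
          (PySem.List.pyRange 0 (maxpos+1) 1).foldl
            (fun (st2 : Int × List Int) pos =>
              let res := pvCountGo fuel m (gap - len - pos - 1) st2.2
              (st2.1 + res.1, res.2))
            (st.1 + maxpos, st.2)) (t, c)).1
        = t + (lens.map (fun len => (gap - len + 1) +
            ((PySem.List.pyRange 0 (gap - len + 2) 1).map
              (fun pos => fvalI m cache (gap - len - pos - 1))).sum)).sum ∧
      Consistent m cache
        ((lens.foldl (fun (st : Int × List Int) len =>
          let maxpos := gap - len + 1
          (PySem.List.pyRange 0 (maxpos+1) 1).foldl
            (fun (st2 : Int × List Int) pos =>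
              let res := pvCountGo fuel m (gap - len - pos - 1) st2.2
              (st2.1 + res.1, res.2))
            (st.1 + maxpos, st.2)) (t, c)).2) := by
  intro lens
  induction lens with
  | nil => intro _ t c hc; exact ⟨by simp, hc⟩
  | cons l ls ih =>
    intro hl t c hc
    have hml : m ≤ l := hl l (by simp)
    have hls : ∀ q ∈ ls, m ≤ q := fun q hq => hl q (by simp [hq])
    simp only [List.foldl_cons]
    have e2 : gap - l + 1 + 1 = gap - l + 2 := by ring
    rw [e2]
    obtain ⟨h1, h2⟩ := inner_loop fuel m cache hm IH gap l hgap0 hgapl hfuel hml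
        (PySem.List.pyRange 0 (gap - l + 2) 1)
        (fun p hp => (PySem.List.mem_pyRange_one.mp hp).1)
        (t + (gap - l + 1)) c hc
    obtain ⟨h3, h4⟩ := ih hls
      ((PySem.List.pyRange 0 (gap - l + 2) 1).foldl
        (fun (st2 : Int × List Int) pos =>
          let res := pvCountGo fuel m (gap - l - pos - 1) st2.2
          (st2.1 + res.1, res.2)) (t + (gap - l + 1), c)).1
      ((PySem.List.pyRange 0 (gap - l + 2) 1).foldl
        (fun (st2 : Int × List Int) pos =>
          let res := pvCountGo fuel m (gap - l - pos - 1) st2.2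
          (st2.1 + res.1, res.2)) (t + (gap - l + 1), c)).2 h2
    refine ⟨?_, h4⟩
    rw [h3, h1]
    simp only [List.map_cons, List.sum_cons]
    ring

theorem consistent_set (m : Int) (cache c2 : List Int) (gap : Int) (hgap0 : 0 ≤ gap)
    (hlenc : gap < (cache.length : Int)) (h2 : Consistent m cache c2)
    (hm1 : cache.getD gap.toNat 0 = -1) (v : Int) (hv : v = fvalI m cache gap) :
    Consistent m cache (PySem.List.pySetD c2 gap v) := by
  obtain ⟨hl2, hprop⟩ := h2
  rw [PySem.List.pySetD_of_nonneg c2 v hgap0]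
  refine ⟨by simpa using hl2, ?_⟩
  intro i hi
  by_cases hieq : i = gap.toNat
  · subst hieq
    right
    refine ⟨hm1, ?_⟩
    rw [List.getD_eq_getElem?_getD, List.getElem?_set, if_pos rfl, if_pos (by omega)]
    simp only [Option.getD_some, hv]
    congr 1
    omega
  · have hkeep := hprop i hi
    rw [List.getD_eq_getElem?_getD, List.getElem?_set, if_neg (fun hh => hieq hh.symm),
      ← List.getD_eq_getElem?_getD]
    exact hkeep

theorem go_main (fuel : Nat) (m : Int) (cache : List Int) (gap : Int) (c : List Int)
    (hm : 0 ≤ m) (hc : Consistent m cache c)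
    (hpre : gap < m ∨ gap < (cache.length : Int))
    (hfuel : gap < m ∨ gap.toNat + 1 ≤ fuel) :
    (pvCountGo fuel m gap c).1 = fvalI m cache gap ∧
      Consistent m cache (pvCountGo fuel m gap c).2 := by
  induction fuel generalizing gap c with
  | zero =>
    have hgm : gap < m := by
      rcases hfuel with h | h
      · exact h
      · omega
    exact ⟨(fvalI_of_lt m cache hgm).symm, hc⟩
  | succ fuel ih =>
    by_cases hgm : gap < m
    · simp only [pvCountGo, if_pos hgm]
      exact ⟨(fvalI_of_lt m cache hgm).symm, hc⟩
    · have hm_le : m ≤ gap := not_lt.mp hgm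
      have hgap0 : 0 ≤ gap := le_trans hm hm_le
      have hlenc : gap < (cache.length : Int) := hpre.resolve_left hgm
      have hclen : c.length = cache.length := hc.1
      have hfu : gap.toNat + 1 ≤ fuel + 1 := hfuel.resolve_left hgm
      have hget : PySem.List.pyGet? c gap = some (c.getD gap.toNat 0) := by
        rw [PySem.List.pyGet?_eq_some_getElem c hgap0 (by omega)]
        congr 1
        exact (List.getD_eq_getElem c 0 (by omega)).symm
      have hcase := hc.2 gap.toNat (by omega)
      have hcast : ((gap.toNat : Nat) : Int) = gap := Int.toNat_of_nonneg hgap0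
      -- fstep characterisation of fvalI at gap
      have hfv : fvalI m cache gap = fstep m cache gap (fvals m cache gap.toNat) :=
        fvalI_eq_fstep m cache hgap0
      have hgetc : PySem.List.pyGet? cache gap = some (cache.getD gap.toNat 0) := by
        rw [PySem.List.pyGet?_eq_some_getElem cache hgap0 (by omega)]
        congr 1
        exact (List.getD_eq_getElem cache 0 (by omega)).symm
      simp only [pvCountGo, if_neg hgm, hget]
      by_cases hne : c.getD gap.toNat 0 ≠ -1
      · simp only [if_pos hne]
        refine ⟨?_, hc⟩
        rcases hcase with heq | ⟨hm1, hval⟩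
        · -- c agrees with cache here, and the cache entry is not -1
          rw [hfv, fstep, if_neg hgm, hgetc, ← heq]
          simp only [ne_eq, ite_not, List.getD_eq_getElem?_getD] at hne ⊢
          rw [if_neg (by simpa using hne)]
        · rw [hval, hcast]
      · simp only [if_neg hne]
        push_neg at hne
        have hm1 : cache.getD gap.toNat 0 = -1 := by
          rcases hcase with heq | ⟨hm1, _⟩
          · rw [← heq, hne]
          · exact hm1
        obtain ⟨h1, h2⟩ := outer_loop fuel m cache hm ih gap hgap0 hlenc (by omega)
          (PySem.List.pyRange m (gap + 1) 1)
          (fun l hl => (PySem.List.mem_pyRange_one.mp hl).1)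
          0 c hc
        -- the computed total equals fvalI
        have hsum : ((PySem.List.pyRange m (gap+1) 1).map (fun len => (gap - len + 1) +
            ((PySem.List.pyRange 0 (gap - len + 2) 1).map
              (fun pos => fvalI m cache (gap - len - pos - 1))).sum)).sum
            = fvalI m cache gap := by
          have hmap1 : ∀ len ∈ PySem.List.pyRange m (gap+1) 1,
              (gap - len + 1) + ((PySem.List.pyRange 0 (gap - len + 2) 1).map
                (fun pos => fvalI m cache (gap - len - pos - 1))).sum
              = (gap - len + 1) + Psum m cache (gap - len).toNat := by
            intro len hlmem
            obtain ⟨hl1, hl2⟩ := PySem.List.mem_pyRange_one.mp hlmem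
            have hK : (((gap - len).toNat : Nat) : Int) = gap - len := by omega
            have := inner_sum_eq m cache (gap - len).toNat
            rw [hK] at this
            rw [show gap - len + 2 = ((gap - len) + 2) from by ring, this]
          rw [List.map_congr_left hmap1, hfv, fstep, if_neg hgm, hgetc, hm1]
          simp only [ne_eq, not_true_eq_false, if_false, ite_false]
          have hbody : (fun (acc : Int) (k : Int) => acc + (k + 1) +
              ((fvals m cache gap.toNat).take k.toNat).sum)
              = (fun (acc : Int) (k : Int) => acc + ((k + 1) +
              ((fvals m cache gap.toNat).take k.toNat).sum)) := by
            funext acc k; ring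
          rw [hbody, PySem.List.foldl_add]
          have hmap2 : ∀ k ∈ PySem.List.pyRange 0 (gap - m + 1) 1,
              (k + 1) + ((fvals m cache gap.toNat).take k.toNat).sum
              = (k + 1) + Psum m cache k.toNat := by
            intro k hkmem
            obtain ⟨hk1, hk2⟩ := PySem.List.mem_pyRange_one.mp hkmem
            rw [fvals_take m cache (by omega), Psum]
          rw [List.map_congr_left hmap2, outer_sum_eq m cache gap hm_le]
          simp
        have htot := h1
        rw [zero_add, hsum] at htot
        exact ⟨by simpa using htot,
          by simpa using consistent_set m cache _ gap hgap0 hlenc h2 hm1 _ htot⟩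



-- ===== VERDICT (by name: the statement is the Claim_ definition above) =====
theorem count_spec : Claim_equal_count := by
  intro m gap cache _ hpre
  unfold Spec_count
  by_cases hgm : gap < m
  · simp [count, pvCountGo, hgm, count_alt]
  · rcases hpre with h | ⟨hm0, hlenc⟩ | ⟨_, _, hin, hne⟩
    · exact absurd h hgm
    · have hcons : Consistent m cache cache := ⟨rfl, fun i _ => Or.inl rfl⟩
      have hmain := (go_main (gap.toNat + 1) m cache gap cache hm0 hcons
        (Or.inr hlenc) (Or.inr le_rfl)).1
      rw [count, hmain, count_alt_eq m gap cache hm0 hlenc]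
    · -- both versions return the cached entry immediately (negative-index lookup included)
      obtain ⟨v, hv⟩ : ∃ v, PySem.List.pyGet? cache gap = some v := by
        cases hq : PySem.List.pyGet? cache gap with
        | none => exact absurd hin ((PySem.List.pyGet?_eq_none_iff cache gap).mp hq)
        | some v => exact ⟨v, rfl⟩
      have hvne : v ≠ -1 := fun hx => hne (by rw [hv, hx])
      rw [count, count_alt]
      simp [pvCountGo, if_neg hgm, hv, hvne]
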